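-- pv_equiv track=rewrite | github.com/AndrewSiwi/Online_judge | 10196.py | bishop
-- ===== SOURCE A (Python) =====
-- def check(chessboard, move_coordinates, enemy_king):
--     directions = { "none": True,
--                    "right": True, "left": True, "down": True, "up": True,
--                    "down_right": True, "down_left": True, "up_right": True, "up_left": True }
--
--     for m_c in move_coordinates:
--         r = m_c[0]
--         c = m_c[1]
--         direction = m_c[2]
--         if directions[direction] and is_in_chessboard(r, c):
--             if chessboard[r][c] == enemy_king:
--                 return True
--             elif chessboard[r][c] != ".":
--                 directions[direction] = False
--             directions["none"] = True
--
--     return False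
--
-- def is_in_chessboard(i, j):
--     ret = i < 8 and i > -1 and j < 8 and j > -1
--     return ret
--
-- def bishop(chessboard, i, j, enemy_king):
--     move_coordinates = []
--     for m in range(1, 8):
--         move_coordinates.append((i + m, j + m, "down_right"))
--         move_coordinates.append((i + m, j - m, "down_left"))
--         move_coordinates.append((i - m, j + m, "up_right"))
--         move_coordinates.append((i - m, j - m, "up_left"))
--
--     return check(chessboard, move_coordinates, enemy_king)
-- ===== SOURCE B (Python) =====
-- def bishop(chessboard, i, j, enemy_king):
--     # Walk each of the four diagonal rays independently (up to 7 steps);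
--     # squares off the 8x8 board are skipped (a ray starting off-board can
--     # re-enter), the first non-empty in-board square ends the ray.
--     for dr, dc in ((1, 1), (1, -1), (-1, 1), (-1, -1)):
--         for m in range(1, 8):
--             r = i + m * dr
--             c = j + m * dc
--             if 0 <= r < 8 and 0 <= c < 8:
--                 sq = chessboard[r][c]
--                 if sq == enemy_king:
--                     return True
--                 if sq != ".":
--                     break
--     return False
-- ===== Notes on version B (the rewrite author's own statement) =====
-- stated objective: simpler
-- what changed: A builds a flat 28-entry interleaved move list and scans it once while maintaining a per-direction alive-flag dict; B walks the four diagonal rays independently with nested loops that stop a ray early (break) at the first blocking piece.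
import Mathlib
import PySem

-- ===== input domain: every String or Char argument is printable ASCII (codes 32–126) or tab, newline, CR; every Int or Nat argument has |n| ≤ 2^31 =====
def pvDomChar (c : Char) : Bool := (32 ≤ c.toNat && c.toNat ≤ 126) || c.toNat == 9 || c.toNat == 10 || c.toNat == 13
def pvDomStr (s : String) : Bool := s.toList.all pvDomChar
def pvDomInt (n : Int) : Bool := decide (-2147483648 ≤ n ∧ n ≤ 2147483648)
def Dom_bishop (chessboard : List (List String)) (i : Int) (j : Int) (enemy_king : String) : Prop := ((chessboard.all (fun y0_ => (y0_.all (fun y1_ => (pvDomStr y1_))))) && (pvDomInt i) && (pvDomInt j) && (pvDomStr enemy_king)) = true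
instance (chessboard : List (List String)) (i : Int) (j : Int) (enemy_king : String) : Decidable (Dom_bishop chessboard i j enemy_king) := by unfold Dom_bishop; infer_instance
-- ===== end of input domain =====

-- B replaces A's flat 28-entry interleaved move list plus per-direction alive-flag dict
-- with four independent per-direction ray walks that stop early; objective: simpler.

-- ===== PORT A =====

def is_in_chessboard (i : Int) (j : Int) : Bool :=
  decide (i < 8) && decide (i > -1) && decide (j < 8) && decide (j > -1)

def pvCellA (chessboard : List (List String)) (r : Int) (c : Int) : String :=
  (((PySem.List.pyGet? chessboard r).bind (fun row => PySem.List.pyGet? row c)).getD "")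

def checkLoop (chessboard : List (List String)) (enemy_king : String) :
    List (Int × Int × String) → PySem.Dict String Bool → Bool
  | [], _ => false
  | (r, c, direction) :: rest, directions =>
    if directions.getD direction false && is_in_chessboard r c then
      if pvCellA chessboard r c == enemy_king then true
      else if pvCellA chessboard r c != "." then
        checkLoop chessboard enemy_king rest
          (((directions.insert direction false).insert "none" true))
      else checkLoop chessboard enemy_king rest (directions.insert "none" true)
    else checkLoop chessboard enemy_king rest directions

def check (chessboard : List (List String)) (move_coordinates : List (Int × Int × String))
    (enemy_king : String) : Bool :=
  checkLoop chessboard enemy_king move_coordinates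
    (PySem.Dict.ofList [("none", true),
      ("right", true), ("left", true), ("down", true), ("up", true),
      ("down_right", true), ("down_left", true), ("up_right", true), ("up_left", true)])

def bishop (chessboard : List (List String)) (i : Int) (j : Int) (enemy_king : String) : Bool :=
  check chessboard
    ((PySem.List.pyRange 1 8 1).foldl (fun acc m =>
      acc ++ [(i + m, j + m, "down_right"), (i + m, j - m, "down_left"),
              (i - m, j + m, "up_right"), (i - m, j - m, "up_left")]) [])
    enemy_king

-- ===== PORT B =====
def pvCellB (chessboard : List (List String)) (r : Int) (c : Int) : String :=
  (((PySem.List.pyGet? chessboard r).bind (fun row => PySem.List.pyGet? row c)).getD "")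

def rayLoop (chessboard : List (List String)) (enemy_king : String) (i : Int) (j : Int)
    (dr : Int) (dc : Int) : List Int → Bool
  | [] => false
  | m :: ms =>
    let r := i + m * dr
    let c := j + m * dc
    if 0 ≤ r ∧ r < 8 ∧ 0 ≤ c ∧ c < 8 then
      let sq := pvCellB chessboard r c
      if sq == enemy_king then true
      else if sq != "." then false
      else rayLoop chessboard enemy_king i j dr dc ms
    else rayLoop chessboard enemy_king i j dr dc ms
def bishop_alt (chessboard : List (List String)) (i : Int) (j : Int) (enemy_king : String) : Bool :=
  [((1 : Int), (1 : Int)), (1, -1), (-1, 1), (-1, -1)].any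
    (fun d => rayLoop chessboard enemy_king i j d.1 d.2 (PySem.List.pyRange 1 8 1))

-- ===== PRECONDITION & SPEC =====
-- Pre_ excludes inputs on which some in-[0,8)² diagonal square of (i,j) is missing from the
-- (ragged or short) chessboard list: there Python A raises IndexError unless it finds the king
-- first, and on those found-first boards B raises IndexError instead (the two programs probe the
-- squares in different orders), so neither value is claimed.
def Pre_bishop (chessboard : List (List String)) (i : Int) (j : Int) (_enemy_king : String) : Prop :=
  ∀ m ∈ ([1, 2, 3, 4, 5, 6, 7] : List Int), ∀ dr ∈ ([1, -1] : List Int), ∀ dc ∈ ([1, -1] : List Int),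
    (0 ≤ i + m * dr ∧ i + m * dr < 8 ∧ 0 ≤ j + m * dc ∧ j + m * dc < 8) →
    ((PySem.List.pyGet? chessboard (i + m * dr)).bind
      (fun row => PySem.List.pyGet? row (j + m * dc))).isSome
instance (chessboard : List (List String)) (i : Int) (j : Int) (enemy_king : String) : Decidable (Pre_bishop chessboard i j enemy_king) := by unfold Pre_bishop; infer_instance

def pvWitness_bishop : List (List String) × Int × Int × String :=
  ([[".", ".", ".", ".", ".", ".", ".", "."], [".", ".", ".", ".", ".", ".", ".", "."],
    [".", ".", ".", ".", ".", ".", ".", "."], [".", ".", ".", "k", ".", ".", ".", "."],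
    [".", ".", ".", ".", ".", ".", ".", "."], [".", ".", ".", ".", ".", ".", ".", "."],
    [".", ".", ".", ".", ".", ".", ".", "."], [".", ".", ".", ".", ".", ".", ".", "."]],
   0, 0, "k")

def Spec_bishop (chessboard : List (List String)) (i : Int) (j : Int) (enemy_king : String) (out : Bool) : Prop := out = bishop_alt chessboard i j enemy_king
instance (chessboard : List (List String)) (i : Int) (j : Int) (enemy_king : String) (out : Bool) : Decidable (Spec_bishop chessboard i j enemy_king out) := by unfold Spec_bishop; infer_instance

-- ===== CLAIM (what is proved, stated in full; the proofs are below) =====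
def Claim_equal_bishop : Prop := ∀ (chessboard : List (List String)) (i : Int) (j : Int) (enemy_king : String), Dom_bishop chessboard i j enemy_king → Pre_bishop chessboard i j enemy_king → Spec_bishop chessboard i j enemy_king (bishop chessboard i j enemy_king)

-- ===== LEMMAS AND PROOFS =====

lemma is_in_eq (r c : Int) :
    is_in_chessboard r c = decide (0 ≤ r ∧ r < 8 ∧ 0 ≤ c ∧ c < 8) := by
  by_cases h : (0 ≤ r ∧ r < 8 ∧ 0 ≤ c ∧ c < 8) <;> simp [is_in_chessboard, h] <;> omega

lemma cellB_eq_cellA : pvCellB = pvCellA := rfl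

def dirOf (d : String) : Int × Int :=
  if d = "down_right" then (1, 1)
  else if d = "down_left" then (1, -1)
  else if d = "up_right" then (-1, 1)
  else (-1, -1)

def TagOK (d : String) : Prop :=
  d = "down_right" ∨ d = "down_left" ∨ d = "up_right" ∨ d = "up_left"

def sel (d : String) : List (Int × String) → List Int
  | [] => []
  | (m, d') :: L => if d' = d then m :: sel d L else sel d L

def orFour (f : String → Bool) : Bool :=
  f "down_right" || f "down_left" || f "up_right" || f "up_left"

lemma orFour_congr {f g : String → Bool} (h : ∀ d, TagOK d → f d = g d) :
    orFour f = orFour g := by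
  unfold orFour
  rw [h _ (Or.inl rfl), h _ (Or.inr (Or.inl rfl)), h _ (Or.inr (Or.inr (Or.inl rfl))),
    h _ (Or.inr (Or.inr (Or.inr rfl)))]

lemma orFour_true {f : String → Bool} {d0 : String} (h4 : TagOK d0) (hf : f d0 = true) :
    orFour f = true := by
  rcases h4 with h | h | h | h <;> subst h <;> simp [orFour, hf]

lemma tag_ne_none {d : String} (h4 : TagOK d) : ¬ d = "none" := by
  rcases h4 with h | h | h | h <;> subst h <;> decide

lemma sel_cons_self (d : String) (m : Int) (L : List (Int × String)) :
    sel d ((m, d) :: L) = m :: sel d L := by simp [sel]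

lemma sel_cons_ne (d d0 : String) (m : Int) (L : List (Int × String)) (h : ¬ d0 = d) :
    sel d ((m, d0) :: L) = sel d L := by simp [sel, h]

lemma check_main (cb : List (List String)) (ek : String) (i j : Int) :
    ∀ (L : List (Int × String)), (∀ p ∈ L, TagOK p.2) →
    ∀ dirs : PySem.Dict String Bool,
    checkLoop cb ek
      (L.map (fun p => (i + p.1 * (dirOf p.2).1, j + p.1 * (dirOf p.2).2, p.2))) dirs
    = orFour (fun d => dirs.getD d false &&
        rayLoop cb ek i j (dirOf d).1 (dirOf d).2 (sel d L)) := by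
  intro L
  induction L with
  | nil =>
    intro _ dirs
    simp [checkLoop, sel, rayLoop, orFour]
  | cons p L ihL =>
    intro h dirs
    have IH := ihL (fun q hq => h q (List.mem_cons_of_mem p hq))
    obtain ⟨m, d0⟩ := p
    have h4 : TagOK d0 := h (m, d0) List.mem_cons_self
    simp only [List.map_cons, checkLoop, is_in_eq]
    cases hb : dirs.getD d0 false with
    | false =>
      rw [Bool.false_and, if_neg (by simp), IH]
      refine orFour_congr (fun d hd => ?_)
      by_cases hdd : d = d0
      · subst hdd
        rw [sel_cons_self, hb]
        simp
      · rw [sel_cons_ne d d0 m L (fun h' => hdd h'.symm)]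
    | true =>
      rw [Bool.true_and]
      by_cases hP : (0 ≤ i + m * (dirOf d0).1 ∧ i + m * (dirOf d0).1 < 8 ∧
          0 ≤ j + m * (dirOf d0).2 ∧ j + m * (dirOf d0).2 < 8)
      · rw [if_pos (by simpa using hP)]
        by_cases hk : pvCellA cb (i + m * (dirOf d0).1) (j + m * (dirOf d0).2) = ek
        · rw [if_pos (by simp [hk])]
          refine (orFour_true h4 ?_).symm
          rw [hb, Bool.true_and, sel_cons_self]
          simp only [rayLoop]
          rw [if_pos hP]
          simp [cellB_eq_cellA, hk]
        · rw [if_neg (by simp [hk])]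
          by_cases hdot : pvCellA cb (i + m * (dirOf d0).1) (j + m * (dirOf d0).2) = "."
          · rw [if_neg (by simp [hdot]), IH]
            refine orFour_congr (fun d hd => ?_)
            rw [PySem.Dict.getD_insert, if_neg (tag_ne_none hd)]
            by_cases hdd : d = d0
            · subst hdd
              rw [sel_cons_self]
              simp only [rayLoop]
              rw [if_pos hP]
              simp [cellB_eq_cellA, hdot, show ¬ ("." = ek) from fun hh => hk (hdot.trans hh)]
            · rw [sel_cons_ne d d0 m L (fun h' => hdd h'.symm)]
          · rw [if_pos (by simp [hdot]), IH]
            refine orFour_congr (fun d hd => ?_)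
            rw [PySem.Dict.getD_insert, if_neg (tag_ne_none hd), PySem.Dict.getD_insert]
            by_cases hdd : d = d0
            · subst hdd
              rw [if_pos rfl, Bool.false_and, sel_cons_self, hb, Bool.true_and]
              simp only [rayLoop]
              rw [if_pos hP]
              simp [cellB_eq_cellA, hk, hdot]
            · rw [if_neg hdd, sel_cons_ne d d0 m L (fun h' => hdd h'.symm)]
      · rw [if_neg (by simpa using hP), IH]
        refine orFour_congr (fun d hd => ?_)
        by_cases hdd : d = d0
        · subst hdd
          rw [sel_cons_self]
          conv_rhs => rw [rayLoop]
          rw [if_neg hP]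
        · rw [sel_cons_ne d d0 m L (fun h' => hdd h'.symm)]

def mixList (ms : List Int) : List (Int × String) :=
  ms.flatMap (fun m => [(m, "down_right"), (m, "down_left"), (m, "up_right"), (m, "up_left")])

lemma moves_eq (i j : Int) : ∀ ms : List Int,
    (ms.flatMap (fun m => [(i + m, j + m, "down_right"), (i + m, j - m, "down_left"),
                           (i - m, j + m, "up_right"), (i - m, j - m, "up_left")]))
    = (mixList ms).map (fun p => (i + p.1 * (dirOf p.2).1, j + p.1 * (dirOf p.2).2, p.2)) := by
  intro ms
  induction ms with
  | nil => simp [mixList]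
  | cons m ms ih =>
    simp [mixList, dirOf, ih, mul_one, ← sub_eq_add_neg]

lemma mix_tags : ∀ ms : List Int, ∀ p ∈ mixList ms, TagOK p.2 := by
  intro ms
  induction ms with
  | nil => simp [mixList]
  | cons m ms ih =>
    intro p hp
    simp only [mixList, List.flatMap_cons, List.mem_append] at hp
    rcases hp with hp | hp
    · simp only [List.mem_cons, List.not_mem_nil, or_false] at hp
      rcases hp with h | h | h | h <;> subst h <;> simp [TagOK]
    · exact ih p hp

lemma sel_mix (d : String) (hd : TagOK d) : ∀ ms : List Int, sel d (mixList ms) = ms := by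
  intro ms
  induction ms with
  | nil => rcases hd with h | h | h | h <;> subst h <;> simp [mixList, sel]
  | cons m ms ih =>
    rcases hd with h | h | h | h <;> subst h <;>
      simp only [mixList, List.flatMap_cons] at * <;> simp [sel, ih]

-- ===== VERDICT (by name: the statement is the Claim_ definition above) =====
theorem bishop_spec : Claim_equal_bishop := by
  intro cb i j ek _ _
  show _ = _
  rw [bishop, check, PySem.List.foldl_append_eq_flatMap, List.nil_append, moves_eq,
    check_main cb ek i j _ (mix_tags _)]
  simp only [orFour]
  rw [sel_mix _ (Or.inl rfl), sel_mix _ (Or.inr (Or.inl rfl)),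
    sel_mix _ (Or.inr (Or.inr (Or.inl rfl))), sel_mix _ (Or.inr (Or.inr (Or.inr rfl)))]
  rw [show (PySem.Dict.ofList [("none", true), ("right", true), ("left", true), ("down", true),
        ("up", true), ("down_right", true), ("down_left", true), ("up_right", true),
        ("up_left", true)] : PySem.Dict String Bool).getD "down_right" false = true from rfl]
  rw [show (PySem.Dict.ofList [("none", true), ("right", true), ("left", true), ("down", true),
        ("up", true), ("down_right", true), ("down_left", true), ("up_right", true),
        ("up_left", true)] : PySem.Dict String Bool).getD "down_left" false = true from rfl]
  rw [show (PySem.Dict.ofList [("none", true), ("right", true), ("left", true), ("down", true),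
        ("up", true), ("down_right", true), ("down_left", true), ("up_right", true),
        ("up_left", true)] : PySem.Dict String Bool).getD "up_right" false = true from rfl]
  rw [show (PySem.Dict.ofList [("none", true), ("right", true), ("left", true), ("down", true),
        ("up", true), ("down_right", true), ("down_left", true), ("up_right", true),
        ("up_left", true)] : PySem.Dict String Bool).getD "up_left" false = true from rfl]
  simp [bishop_alt, dirOf, Bool.or_assoc]
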